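-- pv_equiv track=rewrite | github.com/lola-adeyemi/code-first-girls | lola-adeyemi-homework-3.py | generate_phrase
-- ===== SOURCE A (Python) =====
-- def generate_phrase(characters, phrase):
--     set1 = list(characters)  # convert string to list
--     set2 = list(phrase)
--     counter = 0  # keep count of matching pairs
--
--     try:
--         for each in set2:  # go through each element in the phrase
--             if each in set1:  # see if each element matches with characters
--                 set1.remove(each)  # if a match is found remove the matched item from characters
--                 counter += 1  # count how many matches were made
--     except IndexError:
--         return False
--
--     finally:
--         if len(set2) == counter:  # if number of matches equals the number of elements in the phrase
--             return True
--         else: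
--             return False
-- ===== SOURCE B (Python) =====
-- def generate_phrase(characters, phrase):
--     avail = {}
--     for ch in characters:
--         avail[ch] = avail.get(ch, 0) + 1
--     need = {}
--     for ch in phrase:
--         need[ch] = need.get(ch, 0) + 1
--     for ch, n in need.items():
--         if n > avail.get(ch, 0):
--             return False
--     return True
-- ===== Notes on version B (the rewrite author's own statement) =====
-- stated objective: faster
-- what changed: Replaces the consuming scan (membership test + list.remove per phrase character, quadratic) with two full-pass frequency tables and a single comparison over the distinct phrase characters.
import Mathlib
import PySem

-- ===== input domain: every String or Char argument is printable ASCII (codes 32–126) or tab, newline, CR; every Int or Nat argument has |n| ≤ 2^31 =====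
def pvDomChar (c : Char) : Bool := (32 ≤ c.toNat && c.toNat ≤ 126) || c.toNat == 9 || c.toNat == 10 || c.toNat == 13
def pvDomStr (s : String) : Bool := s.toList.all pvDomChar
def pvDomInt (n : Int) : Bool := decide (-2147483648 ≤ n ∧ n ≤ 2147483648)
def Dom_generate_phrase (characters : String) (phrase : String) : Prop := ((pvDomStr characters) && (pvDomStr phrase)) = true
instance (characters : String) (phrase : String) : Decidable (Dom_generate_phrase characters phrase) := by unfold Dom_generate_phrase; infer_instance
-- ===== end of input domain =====

-- B replaces A's consuming membership-test-and-remove scan by two frequency tables compared once (asymptotically faster in Python); return value only, A mutates no argument.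

-- ===== PORT A =====
-- the loop: for each in set2: if each in set1: set1.remove(each); counter += 1
-- (set1.remove is guarded by the membership test, so Python never raises; the .getD set1
--  arm of remove? is unreachable)
def pvALoop : List Char → List Char → Int → List Char × Int
  | set1, [], counter => (set1, counter)
  | set1, each :: rest, counter =>
    if set1.contains each then
      pvALoop ((PySem.List.remove? set1 each).getD set1) rest (counter + 1)
    else
      pvALoop set1 rest counter

def generate_phrase (characters : String) (phrase : String) : Bool :=
  let set1 := characters.toList
  let set2 := phrase.toList
  let r := pvALoop set1 set2 0
  -- finally: len(set2) == counter
  decide ((set2.length : Int) = r.2)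

-- ===== PORT B =====
-- d[ch] = d.get(ch, 0) + 1 over a string
def pvCount (cs : List Char) : PySem.Dict Char Int :=
  cs.foldl (fun d ch => d.insert ch (d.getD ch 0 + 1)) PySem.Dict.empty

def generate_phrase_alt (characters : String) (phrase : String) : Bool :=
  let avail := pvCount characters.toList
  let need := pvCount phrase.toList
  -- for ch, n in need.items(): if n > avail.get(ch, 0): return False / return True
  need.items.all (fun kn => !decide (avail.getD kn.1 0 < kn.2))

-- ===== PRECONDITION & SPEC =====
def Spec_generate_phrase (characters : String) (phrase : String) (out : Bool) : Prop := out = generate_phrase_alt characters phrase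
instance (characters : String) (phrase : String) (out : Bool) : Decidable (Spec_generate_phrase characters phrase out) := by unfold Spec_generate_phrase; infer_instance

-- ===== CLAIM (what is proved, stated in full; the proofs are below) =====
def Claim_equal_generate_phrase : Prop := ∀ (characters : String) (phrase : String), Dom_generate_phrase characters phrase → Spec_generate_phrase characters phrase (generate_phrase characters phrase)

-- ===== LEMMAS AND PROOFS =====

lemma pvALoop_snd_le (set2 : List Char) : ∀ (set1 : List Char) (k : Int),
    (pvALoop set1 set2 k).2 ≤ k + set2.length := by
  induction set2 with
  | nil => intro set1 k; simp [pvALoop]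
  | cons c rest ih =>
    intro set1 k
    simp only [pvALoop]
    split
    · have := ih ((PySem.List.remove? set1 c).getD set1) (k + 1)
      simp only [List.length_cons]
      push_cast
      omega
    · have := ih set1 k
      simp only [List.length_cons]
      push_cast
      omega

lemma pvALoop_snd_eq_iff (set2 : List Char) : ∀ (set1 : List Char) (k : Int),
    ((pvALoop set1 set2 k).2 = k + set2.length ↔ ∀ c, set2.count c ≤ set1.count c) := by
  induction set2 with
  | nil => intro set1 k; simp [pvALoop]
  | cons c rest ih =>
    intro set1 k
    simp only [pvALoop]
    by_cases hc : c ∈ set1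
    · rw [if_pos (by simpa using hc), PySem.List.remove?_eq_some_erase set1 c hc, Option.getD_some]
      have h := ih (set1.erase c) (k + 1)
      have hlen : ((pvALoop (set1.erase c) rest (k + 1)).2 = k + ((c :: rest).length : Int)) ↔
          ((pvALoop (set1.erase c) rest (k + 1)).2 = (k + 1) + (rest.length : Int)) := by
        simp only [List.length_cons]; push_cast; omega
      rw [hlen, h]
      constructor
      · intro h c'
        by_cases hcc : c' = c
        · subst hcc
          have h1 := h c'
          have h2 : (set1.erase c').count c' = set1.count c' - 1 := List.count_erase_self ..
          have h3 : 1 ≤ set1.count c' := List.one_le_count_iff.mpr hc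
          simp only [List.count_cons_self]
          omega
        · have h1 := h c'
          rw [List.count_erase_of_ne hcc] at h1
          rw [List.count_cons_of_ne (Ne.symm hcc)]
          exact h1
      · intro h c'
        by_cases hcc : c' = c
        · subst hcc
          have h1 := h c'
          rw [List.count_erase_self]
          simp only [List.count_cons_self] at h1
          omega
        · have h1 := h c'
          rw [List.count_erase_of_ne hcc]
          rw [List.count_cons_of_ne (Ne.symm hcc)] at h1
          exact h1
    · rw [if_neg (by simpa using hc)]
      constructor
      · intro h
        exfalso
        have := pvALoop_snd_le rest set1 k
        simp only [List.length_cons] at h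
        push_cast at h
        omega
      · intro h
        exfalso
        have h1 := h c
        simp only [List.count_cons_self] at h1
        have h2 : set1.count c = 0 := List.count_eq_zero.mpr hc
        omega

lemma pvAlt_iff (characters phrase : String) :
    generate_phrase_alt characters phrase = true ↔
      ∀ c, phrase.toList.count c ≤ characters.toList.count c := by
  unfold generate_phrase_alt pvCount
  simp only [PySem.Dict.foldl_insert_getD_add_one_eq_counter, PySem.Dict.items_counter]
  simp only [List.all_map, List.all_eq_true, Function.comp, Bool.not_eq_eq_eq_not,
    Bool.not_true, decide_eq_false_iff_not, not_lt, PySem.Dict.getD_counter]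
  constructor
  · intro h c
    by_cases hm : c ∈ phrase.toList
    · have := h c ((PySem.Set.mem_ofList _ _).mpr hm)
      exact_mod_cast this
    · simp [List.count_eq_zero.mpr hm]
  · intro h k _
    exact_mod_cast h k

theorem generate_phrase_spec_aux (characters phrase : String) :
    generate_phrase characters phrase = generate_phrase_alt characters phrase := by
  rw [Bool.eq_iff_iff]
  unfold generate_phrase
  rw [pvAlt_iff, decide_eq_true_iff]
  have := pvALoop_snd_eq_iff phrase.toList characters.toList 0
  simpa [eq_comm] using this

-- ===== VERDICT (by name: the statement is the Claim_ definition above) =====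
theorem generate_phrase_spec : Claim_equal_generate_phrase := by
  intro characters phrase _
  exact generate_phrase_spec_aux characters phrase
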